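-- pv_equiv track=rewrite | github.com/S-V-R-S/AoC | adventOfCode/2023/day23-2.py | constructionMatrice
-- ===== SOURCE A (Python) =====
-- def constructionMatrice(lignes):
--     lignes = lignes.split("\n")
--     matrice = []
--     depart = ()
--     for i,l in enumerate(lignes):
--         matrice.append([])
--         for c, case in enumerate(l.strip()):
--             if i == 0 and case == ".":
--                 depart = (c, i)
--             if i == len(lignes)-1 and case == ".":
--                 arrivee = (c ,i)
--             matrice[i].append(case)
--
--     return matrice, depart, arrivee
-- ===== SOURCE B (Python) =====
-- def constructionMatrice(lignes):
--     ls = [l.strip() for l in lignes.split("\n")]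
--     depart = (len(ls[0]) - 1 - ls[0][::-1].index("."), 0)
--     arrivee = (len(ls[-1]) - 1 - ls[-1][::-1].index("."), len(ls) - 1)
--     return [list(l) for l in ls], depart, arrivee
-- ===== Notes on version B (the rewrite author's own statement) =====
-- stated objective: simpler
-- what changed: Replaces the interleaved nested loop with stateful overwriting by a comprehension building the stripped rows plus two direct last-index computations (reverse .index) on the first and last row only.
-- outside the precondition, e.g. on constructionMatrice('#\n.'): A returns ([['#'], ['.']], (), (0, 1)), B raises ValueError
import Mathlib
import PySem

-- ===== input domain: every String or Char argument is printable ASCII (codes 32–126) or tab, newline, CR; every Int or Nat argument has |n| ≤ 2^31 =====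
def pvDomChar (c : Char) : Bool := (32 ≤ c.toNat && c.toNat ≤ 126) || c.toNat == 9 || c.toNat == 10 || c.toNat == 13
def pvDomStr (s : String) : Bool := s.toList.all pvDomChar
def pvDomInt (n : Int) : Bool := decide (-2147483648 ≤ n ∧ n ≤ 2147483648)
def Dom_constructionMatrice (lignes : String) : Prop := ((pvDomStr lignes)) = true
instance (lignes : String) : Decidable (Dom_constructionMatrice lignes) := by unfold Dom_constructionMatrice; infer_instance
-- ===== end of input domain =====

-- B replaces A's interleaved nested loop (overwriting depart/arrivee while appending chars) by a
-- comprehension building the stripped rows plus two direct reverse-index computations on the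
-- boundary rows only (simpler decomposition; return-value equivalence on Pre_).

-- ===== PORT A =====
-- inner loop body of A: dep/arr overwritten on '.', char appended to the current row
def innerStepA (i : Int) (n : Nat)
    (q : List String × Option (Int × Int) × Option (Int × Int)) (ce : Int × Char) :
    List String × Option (Int × Int) × Option (Int × Int) :=
  ( q.1 ++ [String.mk [ce.2]],
    (if i = 0 ∧ ce.2 = '.' then some (ce.1, i) else q.2.1),
    (if i = (n : Int) - 1 ∧ ce.2 = '.' then some (ce.1, i) else q.2.2) )

-- outer loop body of A: matrice.append([]) then the inner loop fills matrice[i]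
def outerStepA (n : Nat)
    (st : List (List String) × Option (Int × Int) × Option (Int × Int)) (p : Int × String) :
    List (List String) × Option (Int × Int) × Option (Int × Int) :=
  let row := (PySem.List.enumerate (PySem.Str.strip p.2).toList 0).foldl (innerStepA p.1 n) ([], st.2.1, st.2.2)
  (st.1 ++ [row.1], row.2)

-- depart = () and an unbound arrivee are modelled as `none` (outside Pre_ the result is arbitrary)
def constructionMatrice (lignes : String) : List (List String) × (Int × Int) × (Int × Int) :=
  let ls := (PySem.Str.split? lignes "\n").getD []
  let st := (PySem.List.enumerate ls 0).foldl (outerStepA ls.length) ([], none, none)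
  (st.1, st.2.1.getD (0, 0), st.2.2.getD (0, 0))

-- ===== PORT B =====
-- s.split("\n") is never empty, so ls[0] / ls[-1] are headD / getLastD;
-- l[::-1] is List.reverse (PySem.List.slice?_none_none_neg_one); .index(".") is
-- PySem.List.index? ('.'): none = ValueError, excluded by Pre_, modelled by getD 0.
def constructionMatrice_alt (lignes : String) : List (List String) × (Int × Int) × (Int × Int) :=
  let ls := ((PySem.Str.split? lignes "\n").getD []).map PySem.Str.strip
  let s0 := (ls.headD "").toList
  let sN := (ls.getLastD "").toList
  let depart : Int × Int := ((s0.length : Int) - 1 - (((PySem.List.index? s0.reverse '.').getD 0 : Nat) : Int), 0)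
  let arrivee : Int × Int := ((sN.length : Int) - 1 - (((PySem.List.index? sN.reverse '.').getD 0 : Nat) : Int), (ls.length : Int) - 1)
  (ls.map (fun l => l.toList.map (fun c => String.mk [c])), depart, arrivee)

-- ===== PRECONDITION & SPEC =====
-- Pre_ excludes inputs whose first stripped line has no '.' (A then returns depart = (), an
-- empty tuple outside the declared (Int × Int) type; B raises ValueError) and inputs whose last
-- stripped line has no '.' (A raises UnboundLocalError; B raises ValueError).
def Pre_constructionMatrice (lignes : String) : Prop :=
  '.' ∈ (PySem.Str.strip (((PySem.Str.split? lignes "\n").getD []).headD "")).toList ∧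
  '.' ∈ (PySem.Str.strip (((PySem.Str.split? lignes "\n").getD []).getLastD "")).toList
instance (lignes : String) : Decidable (Pre_constructionMatrice lignes) := by
  unfold Pre_constructionMatrice; infer_instance

def pvWitness_constructionMatrice : String := ".#.\n#.#\n.#."

def Spec_constructionMatrice (lignes : String) (out : List (List String) × (Int × Int) × (Int × Int)) : Prop := out = constructionMatrice_alt lignes
instance (lignes : String) (out : List (List String) × (Int × Int) × (Int × Int)) : Decidable (Spec_constructionMatrice lignes out) := by unfold Spec_constructionMatrice; infer_instance

-- ===== CLAIM (what is proved, stated in full; the proofs are below) =====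
def Claim_equal_constructionMatrice : Prop := ∀ (lignes : String), Dom_constructionMatrice lignes → Pre_constructionMatrice lignes → Spec_constructionMatrice lignes (constructionMatrice lignes)

-- ===== LEMMAS AND PROOFS =====

-- absolute index (offset s) of the LAST '.' in cs, as A's overwrite loop computes it
def pvLastDot : List Char → Int → Option Int
  | [], _ => none
  | c :: cs, s => (pvLastDot cs (s + 1)).or (if c = '.' then some s else none)

def pvRowOf (l : String) : List String := (PySem.Str.strip l).toList.map (fun c => String.mk [c])

theorem pvInner_spec (i : Int) (n : Nat) :
    ∀ (cs : List Char) (s : Int) (q : List String × Option (Int × Int) × Option (Int × Int)),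
    (PySem.List.enumerate cs s).foldl (innerStepA i n) q =
      (q.1 ++ cs.map (fun c => String.mk [c]),
       (if i = 0 then (pvLastDot cs s).map (fun k => (k, i)) else none).or q.2.1,
       (if i = (n : Int) - 1 then (pvLastDot cs s).map (fun k => (k, i)) else none).or q.2.2) := by
  intro cs
  induction cs with
  | nil => intro s q; simp [PySem.List.enumerate_nil, pvLastDot, ite_self]
  | cons c cs ih =>
    intro s q
    rw [PySem.List.enumerate_cons, List.foldl_cons, ih]
    simp only [Prod.mk.injEq, innerStepA, pvLastDot]
    refine ⟨by simp, ?_, ?_⟩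
    · by_cases hi : i = 0 <;>
        cases h : pvLastDot cs (s + 1) <;>
        by_cases hc : c = '.' <;>
        simp [hi, hc, Option.or]
    · by_cases hi : i = (n : Int) - 1 <;>
        cases h : pvLastDot cs (s + 1) <;>
        by_cases hc : c = '.' <;>
        simp [hi, hc, Option.or]

theorem pvMid_spec (n : Nat) :
    ∀ (rows : List String) (s : Int)
      (st : List (List String) × Option (Int × Int) × Option (Int × Int)),
      0 < s → s + rows.length ≤ (n : Int) - 1 →
      (PySem.List.enumerate rows s).foldl (outerStepA n) st =
        (st.1 ++ rows.map pvRowOf, st.2.1, st.2.2) := by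
  intro rows
  induction rows with
  | nil => intro s st _ _; simp [PySem.List.enumerate_nil]
  | cons l rows ih =>
    intro s st hs hb
    rw [PySem.List.enumerate_cons, List.foldl_cons]
    have h1 : outerStepA n st (s, l) = (st.1 ++ [pvRowOf l], st.2.1, st.2.2) := by
      unfold outerStepA
      rw [pvInner_spec]
      have hs0 : s ≠ 0 := by omega
      have hsn : s ≠ (n : Int) - 1 := by
        simp only [List.length_cons] at hb; push_cast at hb; omega
      simp [hs0, hsn, pvRowOf]
    rw [h1, ih (s + 1) _ (by omega) (by simp only [List.length_cons] at hb; push_cast at hb ⊢; omega)]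
    simp

theorem pvLastDot_append (cs : List Char) (c : Char) :
    ∀ s, pvLastDot (cs ++ [c]) s = if c = '.' then some (s + cs.length) else pvLastDot cs s := by
  induction cs with
  | nil => intro s; by_cases hc : c = '.' <;> simp [pvLastDot, hc, Option.or]
  | cons d cs ih =>
    intro s
    simp only [List.cons_append, pvLastDot, ih (s + 1)]
    by_cases hc : c = '.'
    · simp only [if_pos hc, Option.some_or]
      congr 1
      simp only [List.length_cons]
      push_cast; ring
    · simp [hc]

theorem pvLastDot_eq (cs : List Char) :
    pvLastDot cs 0 = (PySem.List.index? cs.reverse '.').map (fun j : Nat => (cs.length : Int) - 1 - (j : Int)) := by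
  induction cs using List.reverseRecOn with
  | nil => simp [pvLastDot, PySem.List.index?_eq_idxOf?]
  | append_singleton cs c ih =>
    rw [pvLastDot_append]
    rw [List.reverse_append, List.reverse_singleton, List.singleton_append]
    by_cases hc : c = '.'
    · subst hc
      rw [if_pos rfl, PySem.List.index?_cons_self]
      simp only [Option.map_some, Option.some.injEq, List.length_append, List.length_singleton]
      push_cast; ring
    · rw [PySem.List.index?_cons_of_ne _ hc, if_neg hc, ih, Option.map_map]
      cases h : PySem.List.index? cs.reverse '.' with
      | none => simp
      | some j =>
        simp only [Option.map_some, Function.comp_apply, Option.some.injEq,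
          List.length_append, List.length_singleton]
        push_cast; ring

-- index? finds '.' whenever it is a member
theorem pvIndex?_some (cs : List Char) (h : '.' ∈ cs) :
    ∃ j, PySem.List.index? cs.reverse '.' = some j := by
  have : (PySem.List.index? cs.reverse '.').isSome := by
    rw [PySem.List.index?_isSome_iff]; simpa using h
  exact Option.isSome_iff_exists.mp this

-- the whole claim, on a decomposed non-empty line list (zeta-reduced form of both ports)
theorem pvMain (l0 : String) (rest : List String)
    (hp1 : '.' ∈ (PySem.Str.strip ((l0 :: rest).headD "")).toList)
    (hp2 : '.' ∈ (PySem.Str.strip ((l0 :: rest).getLastD "")).toList) :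
    (((PySem.List.enumerate (l0 :: rest) 0).foldl (outerStepA (l0 :: rest).length) ([], none, none)).1,
     ((PySem.List.enumerate (l0 :: rest) 0).foldl (outerStepA (l0 :: rest).length) ([], none, none)).2.1.getD (0, 0),
     ((PySem.List.enumerate (l0 :: rest) 0).foldl (outerStepA (l0 :: rest).length) ([], none, none)).2.2.getD (0, 0))
    = (((l0 :: rest).map PySem.Str.strip).map (fun l => l.toList.map (fun c => String.mk [c])),
       (((((l0 :: rest).map PySem.Str.strip).headD "").toList.length : Int) - 1 -
          (((PySem.List.index? (((l0 :: rest).map PySem.Str.strip).headD "").toList.reverse '.').getD 0 : Nat) : Int), 0),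
       (((((l0 :: rest).map PySem.Str.strip).getLastD "").toList.length : Int) - 1 -
          (((PySem.List.index? (((l0 :: rest).map PySem.Str.strip).getLastD "").toList.reverse '.').getD 0 : Nat) : Int),
        (((l0 :: rest).map PySem.Str.strip).length : Int) - 1)) := by
  simp only [List.headD_cons] at hp1
  rcases rest.eq_nil_or_concat with hr | ⟨mid, rl, hr⟩
  · -- single line: i = 0 = n - 1
    subst hr
    obtain ⟨j, hj⟩ := pvIndex?_some _ hp1
    rw [PySem.List.enumerate_cons, PySem.List.enumerate_nil, List.foldl_cons, List.foldl_nil]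
    unfold outerStepA
    rw [pvInner_spec]
    rw [show (List.map PySem.Str.strip [l0]).getLastD "" = PySem.Str.strip l0 from rfl,
        show (List.map PySem.Str.strip [l0]).headD "" = PySem.Str.strip l0 from rfl,
        pvLastDot_eq, hj]
    simp only [List.length_singleton]
    split_ifs with h1 h2
    all_goals try (exfalso; first | omega | exact h1 trivial)
    simp
  · rw [List.concat_eq_append] at hr
    subst hr
    -- n = mid.length + 2; rows are l0, mid (indices 1..n-2), rl (index n-1)
    have hgl : (l0 :: (mid ++ [rl])).getLastD "" = rl := by
      rw [← List.cons_append, List.getLastD_concat]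
    have hglm : ((l0 :: (mid ++ [rl])).map PySem.Str.strip).getLastD "" = PySem.Str.strip rl := by
      simp only [List.map_cons, List.map_append, List.map_nil, ← List.cons_append]
      exact List.getLastD_concat
    rw [hgl] at hp2
    obtain ⟨j0, hj0⟩ := pvIndex?_some _ hp1
    obtain ⟨jN, hjN⟩ := pvIndex?_some _ hp2
    have hlen : (l0 :: (mid ++ [rl])).length = mid.length + 2 := by simp
    rw [hlen, hglm]
    rw [PySem.List.enumerate_cons, List.foldl_cons, PySem.List.enumerate_append, List.foldl_append]
    -- first row (i = 0)
    have h0 : outerStepA (mid.length + 2) ([], none, none) (0, l0) =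
        ([pvRowOf l0],
         (pvLastDot (PySem.Str.strip l0).toList 0).map (fun k => (k, (0 : Int))), none) := by
      unfold outerStepA
      rw [pvInner_spec]
      split_ifs with h1 h2
      all_goals try (exfalso; omega)
      simp [pvRowOf]
    rw [h0]
    -- middle rows leave dep/arr alone
    rw [pvMid_spec (mid.length + 2) mid (0 + 1) _ (by omega) (by push_cast; omega)]
    -- last row (i = mid.length + 1 = n - 1 ≠ 0)
    rw [PySem.List.enumerate_cons, PySem.List.enumerate_nil, List.foldl_cons, List.foldl_nil]
    unfold outerStepA
    rw [pvInner_spec]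
    simp only [List.map_cons, List.map_append, List.map_nil, List.headD_cons]
    rw [pvLastDot_eq, pvLastDot_eq, hj0, hjN]
    split_ifs with h1 h2
    all_goals try (exfalso; omega)
    simp only [Option.map_some, Option.some_or, Option.none_or, Option.getD_some,
      List.map_map, List.nil_append, List.length_cons, List.length_append, List.length_map,
      List.length_nil, Prod.mk.injEq]
    refine ⟨?_, trivial, trivial, by push_cast; ring⟩
    simp [pvRowOf, Function.comp]

-- ===== VERDICT (by name: the statement is the Claim_ definition above) =====
theorem constructionMatrice_spec : Claim_equal_constructionMatrice := by
  intro lignes _ hpre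
  unfold Spec_constructionMatrice constructionMatrice constructionMatrice_alt
  obtain ⟨hp1, hp2⟩ := hpre
  cases hls : (PySem.Str.split? lignes "\n").getD [] with
  | nil =>
    rw [hls] at hp1
    exact absurd hp1 (by decide)
  | cons l0 rest =>
    rw [hls] at hp1 hp2
    exact pvMain l0 rest hp1 hp2
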